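-- pv_equiv track=rewrite | github.com/jonstaryuk/advent-of-code | 2017/day01.py | solve_halfway
-- ===== SOURCE A (Python) =====
-- def solve_halfway(s):
--     total = 0
--     n = len(s)
--     half = n // 2
--
--     for i in range(n - 1):
--         if s[i] == s[(i + half) % n]:
--             total += int(s[i])
--
--     if s[-1] == s[half - 1]:
--         total += int(s[-1])
--
--     return total
-- ===== SOURCE B (Python) =====
-- def solve_halfway(s):
--     n = len(s)
--     half = n // 2
--     if n % 2 == 0:
--         # the halfway relation is symmetric for even n: each matching pair
--         # (i, i + half) with i < half contributes its digit twice
--         return 2 * sum(int(s[i]) for i in range(half) if s[i] == s[i + half])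
--     # odd n: gcd(half, n) = 1, so stepping by half from 0 walks a single cycle
--     # through every index; compare current with next and reuse the pointer
--     total = 0
--     j = 0
--     for _ in range(n):
--         k = (j + half) % n
--         if s[j] == s[k]:
--             total += int(s[j])
--         j = k
--     return total
-- ===== Notes on version B (the rewrite author's own statement) =====
-- stated objective: alternative
-- what changed: B replaces A's uniform modular-partner loop by a symmetry argument: for even length it compares only the first half against the second and doubles each matching digit (half the comparisons), and for odd length it walks the single cycle generated by stepping half (gcd(half,n)=1), carrying the partner index from step to step instead of recomputing both lookups.
import Mathlib
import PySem

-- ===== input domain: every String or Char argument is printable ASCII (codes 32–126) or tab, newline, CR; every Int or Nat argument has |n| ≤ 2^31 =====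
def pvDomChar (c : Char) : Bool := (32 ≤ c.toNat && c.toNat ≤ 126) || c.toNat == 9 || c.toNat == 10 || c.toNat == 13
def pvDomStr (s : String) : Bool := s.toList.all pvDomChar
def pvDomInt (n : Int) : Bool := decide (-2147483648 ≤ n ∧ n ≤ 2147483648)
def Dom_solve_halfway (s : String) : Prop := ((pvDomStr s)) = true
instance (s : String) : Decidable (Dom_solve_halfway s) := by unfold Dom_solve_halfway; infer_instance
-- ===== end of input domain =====

-- B exploits the symmetry of the halfway relation: for even length it sums each
-- matching pair once and doubles; for odd length it walks the single cycle generated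
-- by stepping half (gcd(half, n) = 1), reusing the partner index. Same O(n) cost.

-- int(c) for a single character; exact for digit characters, which is all Pre_ admits to it
def digit2int (c : Char) : Int := (c.toNat : Int) - 48

-- ===== PORT A =====
def solve_halfway (s : String) : Int :=
  let l := s.toList
  let n := l.length
  let half := n / 2
  let total := (List.range (n - 1)).foldl
    (fun t i => if l.getD i ' ' = l.getD ((i + half) % n) ' ' then t + digit2int (l.getD i ' ') else t) 0
  -- s[-1] and s[half-1] may be negative Python indices: ported exactly via pyGet?
  match PySem.List.pyGet? l (-1), PySem.List.pyGet? l ((half : Int) - 1) with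
  | some a, some b => if a = b then total + digit2int a else total
  | _, _ => total   -- only reachable for s = "", where Python raises IndexError (excluded by Pre_)

-- ===== PORT B =====
def solve_halfway_alt (s : String) : Int :=
  let l := s.toList
  let n := l.length
  let half := n / 2
  if n % 2 = 0 then
    2 * (List.range half).foldl
      (fun t i => if l.getD i ' ' = l.getD (i + half) ' ' then t + digit2int (l.getD i ' ') else t) 0
  else
    ((List.range n).foldl
      (fun (p : Int × Nat) _ =>
        let k := (p.2 + half) % n
        (if l.getD p.2 ' ' = l.getD k ' ' then p.1 + digit2int (l.getD p.2 ' ') else p.1, k))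
      (0, 0)).1

-- ===== PRECONDITION & SPEC =====
-- Pre_ excludes exactly the inputs where Python A raises: the empty string (IndexError on s[-1])
-- and strings where some character equals its halfway partner but is not a digit (ValueError in int()).
def Pre_solve_halfway (s : String) : Prop :=
  s.toList ≠ [] ∧
  ∀ i, i < s.toList.length →
    s.toList.getD i ' ' = s.toList.getD ((i + s.toList.length / 2) % s.toList.length) ' ' →
    (s.toList.getD i ' ').isDigit = true
instance (s : String) : Decidable (Pre_solve_halfway s) := by unfold Pre_solve_halfway; infer_instance
def pvWitness_solve_halfway : String := "91212129"

def Spec_solve_halfway (s : String) (out : Int) : Prop := out = solve_halfway_alt s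
instance (s : String) (out : Int) : Decidable (Spec_solve_halfway s out) := by unfold Spec_solve_halfway; infer_instance

-- ===== CLAIM (what is proved, stated in full; the proofs are below) =====
def Claim_equal_solve_halfway : Prop := ∀ (s : String), Dom_solve_halfway s → Pre_solve_halfway s → Spec_solve_halfway s (solve_halfway s)

-- ===== LEMMAS AND PROOFS =====

-- the common "term at index i" both programs sum
def pvTerm (l : List Char) (i : Nat) : Int :=
  if l.getD i ' ' = l.getD ((i + l.length / 2) % l.length) ' ' then digit2int (l.getD i ' ') else 0

theorem foldl_if_eq_sum (L : List Nat) (a : Int) (c : Nat → Prop) [DecidablePred c] (f : Nat → Int) :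
    L.foldl (fun t i => if c i then t + f i else t) a
      = a + (L.map (fun i => if c i then f i else 0)).sum := by
  induction L generalizing a with
  | nil => simp
  | cons x xs ih =>
    simp only [List.foldl_cons, List.map_cons, List.sum_cons, ih]
    split_ifs <;> ring

theorem neg_one_get (l : List Char) (hne : l ≠ []) :
    PySem.List.pyGet? l (-1) = some (l.getD (l.length - 1) ' ') := by
  rw [PySem.List.pyGet?_neg_one, List.getLast?_eq_getElem?]
  have hn : 0 < l.length := List.length_pos_iff.mpr hne
  simp [List.getD, List.getElem?_eq_getElem (by omega : l.length - 1 < l.length)]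

theorem halfm1_get (l : List Char) (hne : l ≠ []) :
    PySem.List.pyGet? l ((l.length / 2 : Nat) - 1 : Int)
      = some (l.getD ((l.length - 1 + l.length / 2) % l.length) ' ') := by
  have hn : 0 < l.length := List.length_pos_iff.mpr hne
  by_cases h2 : l.length / 2 = 0
  · -- l.length = 1: the index is -1, Python wraps to the last (only) element
    have hn1 : l.length = 1 := by omega
    obtain ⟨c, hc⟩ := List.length_eq_one_iff.mp hn1
    subst hc
    simp [PySem.List.pyGet?, PySem.List.pyIdx?, List.getD]
  · have hcast : ((l.length / 2 : Nat) : Int) - 1 = ((l.length / 2 - 1 : Nat) : Int) := by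
      push_cast [h2]; omega
    have hm : (l.length - 1 + l.length / 2) % l.length = l.length / 2 - 1 := by
      have hle : l.length / 2 ≤ l.length := Nat.div_le_self _ 2
      rw [Nat.mod_eq_sub_mod (by omega)]
      rw [show l.length - 1 + l.length / 2 - l.length = l.length / 2 - 1 by omega]
      exact Nat.mod_eq_of_lt (by omega)
    rw [hcast, PySem.List.pyGet?_natCast, hm]
    simp [List.getD, List.getElem?_eq_getElem (by omega : l.length / 2 - 1 < l.length)]

-- A's value is the sum of pvTerm over all indices
theorem A_eq_sum (s : String) (hne : s.toList ≠ []) :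
    solve_halfway s = ((List.range s.toList.length).map (pvTerm s.toList)).sum := by
  unfold solve_halfway
  simp only []
  set l := s.toList with hl
  have hn : 0 < l.length := List.length_pos_iff.mpr hne
  have hsum : ((List.range l.length).map (pvTerm l)).sum
      = ((List.range (l.length - 1)).map (pvTerm l)).sum + pvTerm l (l.length - 1) := by
    conv_lhs => rw [show l.length = (l.length - 1) + 1 by omega, List.range_succ]
    simp
  rw [foldl_if_eq_sum, hsum, neg_one_get l hne, halfm1_get l hne]
  have hmap : (List.range (l.length - 1)).map
      (fun i => if l.getD i ' ' = l.getD ((i + l.length / 2) % l.length) ' '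
                then digit2int (l.getD i ' ') else 0)
      = (List.range (l.length - 1)).map (pvTerm l) := rfl
  have hterm : pvTerm l (l.length - 1)
      = if l.getD (l.length - 1) ' ' = l.getD ((l.length - 1 + l.length / 2) % l.length) ' '
        then digit2int (l.getD (l.length - 1) ' ') else 0 := rfl
  simp only [hmap, hterm]
  split_ifs <;> ring

-- list-range sum as a Finset sum
theorem sum_map_range (n : Nat) (f : Nat → Int) :
    ((List.range n).map f).sum = ∑ i ∈ Finset.range n, f i := by
  induction n with
  | zero => simp
  | succ m ih => simp [List.range_succ, Finset.sum_range_succ, ih]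

-- half * (n - 2) ≡ 1 (mod n) for odd n
theorem half_mul_inv (n : Nat) (hodd : n % 2 = 1) : (n / 2) * (n - 2) % n = 1 % n := by
  have hn : n = 2 * (n / 2) + 1 := by omega
  rcases h : n / 2 with _ | m
  · have : n = 1 := by omega
    subst this; decide
  · have h2 : n - 2 = 2 * m + 1 := by omega
    rw [h2, show (m + 1) * (2 * m + 1) = 1 + m * n by rw [hn, h]; ring,
        Nat.add_mul_mod_self_right]

theorem mul_half_cancel (n a : Nat) (hodd : n % 2 = 1) :
    (a * (n / 2) % n) * (n - 2) % n = a % n := by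
  rw [Nat.mod_mul_mod, mul_assoc, Nat.mul_mod, half_mul_inv n hodd, ← Nat.mul_mod, mul_one]

theorem mul_inv_cancel' (n a : Nat) (hodd : n % 2 = 1) :
    (a * (n - 2) % n) * (n / 2) % n = a % n := by
  rw [Nat.mod_mul_mod, mul_assoc, Nat.mul_mod, mul_comm (n - 2), half_mul_inv n hodd,
      ← Nat.mul_mod, mul_one]

-- stepping by half permutes the indices when n is odd
theorem sum_cycle_perm (n : Nat) (hodd : n % 2 = 1) (f : Nat → Int) :
    ∑ k ∈ Finset.range n, f (k * (n / 2) % n) = ∑ i ∈ Finset.range n, f i := by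
  have hn : 0 < n := by omega
  refine Finset.sum_nbij' (fun k => k * (n / 2) % n) (fun k => k * (n - 2) % n)
    (fun a _ => Finset.mem_range.mpr (Nat.mod_lt _ hn))
    (fun a _ => Finset.mem_range.mpr (Nat.mod_lt _ hn))
    (fun a ha => ?_) (fun a ha => ?_) (fun a _ => rfl)
  · show a * (n / 2) % n * (n - 2) % n = a
    rw [mul_half_cancel n a hodd, Nat.mod_eq_of_lt (Finset.mem_range.mp ha)]
  · show a * (n - 2) % n * (n / 2) % n = a
    rw [mul_inv_cancel' n a hodd, Nat.mod_eq_of_lt (Finset.mem_range.mp ha)]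

-- the even-length branch of B
theorem B_even (l : List Char) (he : l.length % 2 = 0) :
    2 * (List.range (l.length / 2)).foldl
        (fun t i => if l.getD i ' ' = l.getD (i + l.length / 2) ' ' then t + digit2int (l.getD i ' ') else t) 0
      = ((List.range l.length).map (pvTerm l)).sum := by
  set n := l.length with hln
  set half := n / 2 with hh
  have hn2 : n = half + half := by omega
  have hterm : ∀ i ∈ List.range half,
      (fun i => if l.getD i ' ' = l.getD (i + half) ' ' then digit2int (l.getD i ' ') else 0) i
        = pvTerm l i := by
    intro i hi
    have hi' : i < half := List.mem_range.mp hi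
    have hm : (i + half) % n = i + half := Nat.mod_eq_of_lt (by omega)
    simp only [pvTerm, ← hln, ← hh, hm]
  have hshift : ∀ i ∈ List.range half, pvTerm l (half + i) = pvTerm l i := by
    intro i hi
    have hi' : i < half := List.mem_range.mp hi
    have hm1 : (half + i + half) % n = i := by
      rw [show half + i + half = i + n by omega, Nat.add_mod_right]
      exact Nat.mod_eq_of_lt (by omega)
    have hm2 : (i + half) % n = i + half := Nat.mod_eq_of_lt (by omega)
    simp only [pvTerm, ← hln, ← hh, hm1, hm2]
    rw [Nat.add_comm i half]
    by_cases hc : l.getD (half + i) ' ' = l.getD i ' '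
    · rw [if_pos hc, if_pos hc.symm, hc]
    · rw [if_neg hc, if_neg (fun h => hc h.symm)]
  rw [foldl_if_eq_sum]
  rw [List.map_congr_left hterm]
  conv_rhs => rw [hn2, List.range_add, List.map_append, List.sum_append, List.map_map]
  have : (List.range half).map (pvTerm l ∘ (half + ·)) = (List.range half).map (pvTerm l) := by
    exact List.map_congr_left (fun i hi => hshift i hi)
  rw [this]; ring

-- the odd-length branch of B: the fold walks the cycle j ↦ (j + half) % n
theorem cycle_fold (l : List Char) (hne : l ≠ []) (m : Nat) (t : Int) (j : Nat)
    (hj : j < l.length) :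
    (List.range m).foldl
      (fun (p : Int × Nat) _ =>
        let k := (p.2 + l.length / 2) % l.length
        (if l.getD p.2 ' ' = l.getD k ' ' then p.1 + digit2int (l.getD p.2 ' ') else p.1, k))
      (t, j)
    = (t + ((List.range m).map (fun k => pvTerm l ((j + k * (l.length / 2)) % l.length))).sum,
       (j + m * (l.length / 2)) % l.length) := by
  have hn : 0 < l.length := List.length_pos_iff.mpr hne
  induction m with
  | zero => simp [Nat.mod_eq_of_lt hj]
  | succ m ih =>
    rw [List.range_succ, List.foldl_append, ih, List.map_append, List.sum_append]
    simp only [List.foldl_cons, List.foldl_nil, List.map_cons, List.map_nil, List.sum_cons,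
      List.sum_nil]
    rw [Prod.mk.injEq]
    constructor
    · simp only [pvTerm]
      split_ifs <;> ring
    · rw [Nat.mod_add_mod,
        show j + m * (l.length / 2) + l.length / 2 = j + (m + 1) * (l.length / 2) by ring]

theorem B_eq_sum (s : String) (hne : s.toList ≠ []) :
    solve_halfway_alt s = ((List.range s.toList.length).map (pvTerm s.toList)).sum := by
  unfold solve_halfway_alt
  simp only []
  set l := s.toList with hl
  have hn : 0 < l.length := List.length_pos_iff.mpr hne
  by_cases he : l.length % 2 = 0
  · rw [if_pos he]
    exact B_even l he
  · rw [if_neg he]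
    have hodd : l.length % 2 = 1 := by omega
    rw [cycle_fold l hne l.length 0 0 hn]
    simp only [zero_add]
    rw [sum_map_range, sum_map_range, sum_cycle_perm l.length hodd (pvTerm l)]

-- ===== VERDICT (by name: the statement is the Claim_ definition above) =====
theorem solve_halfway_spec : Claim_equal_solve_halfway := by
  intro s _ hpre
  unfold Spec_solve_halfway
  rw [A_eq_sum s hpre.1, B_eq_sum s hpre.1]
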